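-- pv_equiv track=rewrite | github.com/cadezd/pdf-parsing | sentence_by_sentence.py | get_len_of_next_sentence
-- ===== SOURCE A (Python) =====
-- CAHRS_THAT_INDICATE_END_OF_SENTENCE: set[str] = {'.', '?', '!'}
--
-- def get_len_of_next_sentence(query: str, idx: int) -> int:
--     words = query[idx:].split(' ')
--     s = 0
--     for word in words:
--         # check if the word contains a character that indicates the end of the sentence
--         if any(char in word for char in CAHRS_THAT_INDICATE_END_OF_SENTENCE):
--             s += len(word) + 1
--             break
--
--         s += len(word) + 1
--
--     return s
-- ===== SOURCE B (Python) =====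
-- CAHRS_THAT_INDICATE_END_OF_SENTENCE: set[str] = {'.', '?', '!'}
--
-- def get_len_of_next_sentence(query: str, idx: int) -> int:
--     sub = query[idx:]
--     # position of the first sentence-ending character, -1 if there is none
--     pos = next((i for i, c in enumerate(sub)
--                 if c in CAHRS_THAT_INDICATE_END_OF_SENTENCE), -1)
--     if pos == -1:
--         return len(sub) + 1
--     sp = sub.find(' ', pos)
--     return len(sub) + 1 if sp == -1 else sp + 1
-- ===== Notes on version B (the rewrite author's own statement) =====
-- stated objective: simpler
-- what changed: B replaces the split-into-words accumulation loop by two direct scans on the suffix: locate the first sentence-ending character, then the first space at or after it, and compute the length arithmetically.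
import Mathlib
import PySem

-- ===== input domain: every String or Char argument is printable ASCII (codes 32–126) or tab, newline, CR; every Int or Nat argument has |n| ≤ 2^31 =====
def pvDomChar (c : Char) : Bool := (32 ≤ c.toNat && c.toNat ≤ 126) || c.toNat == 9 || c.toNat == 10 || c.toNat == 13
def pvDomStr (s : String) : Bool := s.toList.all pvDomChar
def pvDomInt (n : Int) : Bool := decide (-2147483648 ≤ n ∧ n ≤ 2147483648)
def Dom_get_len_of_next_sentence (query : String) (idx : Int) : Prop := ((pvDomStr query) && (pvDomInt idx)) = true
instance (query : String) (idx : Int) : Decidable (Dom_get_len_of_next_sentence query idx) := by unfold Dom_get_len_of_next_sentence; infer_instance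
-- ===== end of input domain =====

-- B locates the first '.?!' character and the first space after it instead of splitting into words and summing word lengths; same value, simpler scan.


-- the module constant CAHRS_THAT_INDICATE_END_OF_SENTENCE = {'.', '?', '!'}
def pvSentenceEndChars : List Char := PySem.Set.ofList ['.', '?', '!']

-- ===== PORT A =====
-- the for-loop with break: add len(word)+1 for each word, stop after the first word containing a sentence-ending char
def pvLoopA : List (List Char) → Int → Int
  | [], s => s
  | w :: ws, s =>
      if pvSentenceEndChars.any (fun ch => PySem.Chars.isIn [ch] w) then
        s + ((w.length : Int) + 1)
      else
        pvLoopA ws (s + ((w.length : Int) + 1))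

def get_len_of_next_sentence (query : String) (idx : Int) : Int :=
  let words := PySem.Chars.splitOn (PySem.List.slice query.toList (some idx) none) [' ']
  pvLoopA words 0

-- ===== PORT B =====
-- 'c in CAHRS_THAT_INDICATE_END_OF_SENTENCE'
def pvIsEnd (c : Char) : Bool := pvSentenceEndChars.contains c

def get_len_of_next_sentence_alt (query : String) (idx : Int) : Int :=
  let sub := PySem.List.slice query.toList (some idx) none
  match sub.findIdx? pvIsEnd with          -- next((i for i, c in enumerate(sub) if c in CHARS), -1)
  | none => (sub.length : Int) + 1
  | some pos =>
      let sp := PySem.Chars.findFrom sub [' '] (pos : Int) none   -- sub.find(' ', pos)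
      if sp = -1 then (sub.length : Int) + 1 else sp + 1

-- ===== PRECONDITION & SPEC =====
def Spec_get_len_of_next_sentence (query : String) (idx : Int) (out : Int) : Prop := out = get_len_of_next_sentence_alt query idx
instance (query : String) (idx : Int) (out : Int) : Decidable (Spec_get_len_of_next_sentence query idx out) := by unfold Spec_get_len_of_next_sentence; infer_instance

-- ===== CLAIM (what is proved, stated in full; the proofs are below) =====
def Claim_equal_get_len_of_next_sentence : Prop := ∀ (query : String) (idx : Int), Dom_get_len_of_next_sentence query idx → Spec_get_len_of_next_sentence query idx (get_len_of_next_sentence query idx)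

-- ===== LEMMAS AND PROOFS =====

-- proof-side recursive form of split(' ')
def pvWords : List Char → List Char → List (List Char)
  | [], cur => [cur.reverse]
  | c :: rest, cur => if c = ' ' then cur.reverse :: pvWords rest [] else pvWords rest (c :: cur)

-- proof-side count: chars still counted from here; b = "current word already holds a sentence-ending char"
def pvE : List Char → Bool → Int
  | [], _ => 1
  | c :: rest, b =>
      if c = ' ' then (if b then 1 else 1 + pvE rest false)
      else 1 + pvE rest (b || pvIsEnd c)

theorem pvSplitOn_go_eq : ∀ (fuel : Nat) (l cur : List Char) (acc : List (List Char)),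
    l.length < fuel →
    PySem.Chars.splitOn.go [' '] fuel l cur acc = acc.reverse ++ pvWords l cur := by
  intro fuel
  induction fuel with
  | zero => intro l cur acc h; omega
  | succ n ih =>
    intro l cur acc h
    cases l with
    | nil => rw [PySem.Chars.splitOn.go.eq_def]; simp [pvWords]
    | cons c rest =>
      rw [PySem.Chars.splitOn.go.eq_def]
      by_cases hc : c = ' '
      · subst hc
        have hp : ([' '] : List Char).isPrefixOf (' ' :: rest) = true := by
          simp [List.isPrefixOf]
        simp only [hp, if_true]
        have hd : List.drop ([' '] : List Char).length (' ' :: rest) = rest := by simp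
        rw [hd, ih rest [] (cur.reverse :: acc) (by simpa using Nat.lt_of_succ_lt_succ h)]
        simp [pvWords]
      · have hp : ([' '] : List Char).isPrefixOf (c :: rest) = false := by
          simp [List.isPrefixOf]; exact fun heq => hc heq.symm
        simp only [hp, Bool.false_eq_true, if_false]
        rw [ih rest (c :: cur) acc (by simpa using Nat.lt_of_succ_lt_succ h)]
        simp [pvWords, hc]

theorem pvSplitOn_eq (l : List Char) : PySem.Chars.splitOn l [' '] = pvWords l [] := by
  unfold PySem.Chars.splitOn
  rw [pvSplitOn_go_eq (l.length + 1) l [] [] (by omega)]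
  simp

theorem pvIn_singleton (c : Char) (w : List Char) :
    PySem.Chars.isIn [c] w = w.contains c := by
  by_cases h : c ∈ w
  · have hinf : [c] <:+: w := by
      obtain ⟨s, t, rfl⟩ := List.append_of_mem h
      exact ⟨s, t, by simp⟩
    rw [(PySem.Chars.isIn_iff_infix _ _).mpr hinf, List.contains_eq_mem]
    simp [h]
  · have hninf : ¬ [c] <:+: w := fun hinf => h (hinf.subset (List.mem_singleton_self c))
    rw [(PySem.Chars.isIn_eq_false_iff _ _).mpr hninf, List.contains_eq_mem]
    simp [h]

theorem pvCond_eq (w : List Char) :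
    (pvSentenceEndChars.any (fun ch => PySem.Chars.isIn [ch] w)) = w.any pvIsEnd := by
  have hset : pvSentenceEndChars = ['.', '?', '!'] := by decide
  rw [Bool.eq_iff_iff]
  simp only [hset, List.any_cons, List.any_nil, pvIn_singleton, Bool.or_false,
    Bool.or_eq_true, List.contains_iff_mem, List.any_eq_true]
  constructor
  · rintro (h | h | h) <;> exact ⟨_, h, by simp [pvIsEnd, hset]⟩
  · rintro ⟨x, hx, hpx⟩
    have : x = '.' ∨ x = '?' ∨ x = '!' := by
      simpa [pvIsEnd, hset] using hpx
    rcases this with rfl | rfl | rfl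
    · exact Or.inl hx
    · exact Or.inr (Or.inl hx)
    · exact Or.inr (Or.inr hx)

theorem pvLoopA_words : ∀ (l cur : List Char) (s : Int),
    pvLoopA (pvWords l cur) s = s + (cur.length : Int) + pvE l (cur.any pvIsEnd) := by
  intro l
  induction l with
  | nil =>
    intro cur s
    simp only [pvWords, pvE, pvLoopA, pvCond_eq, List.any_reverse, List.length_reverse]
    split_ifs <;> ring
  | cons c rest ih =>
    intro cur s
    by_cases hc : c = ' '
    · subst hc
      cases hb : cur.any pvIsEnd with
      | true =>
        rw [show pvWords (' ' :: rest) cur = cur.reverse :: pvWords rest [] from by simp [pvWords]]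
        rw [show pvLoopA (cur.reverse :: pvWords rest []) s = s + ((cur.reverse.length : Int) + 1) from by
          simp [pvLoopA, pvCond_eq, List.any_reverse, hb]]
        simp [pvE]
        ring
      | false =>
        rw [show pvWords (' ' :: rest) cur = cur.reverse :: pvWords rest [] from by simp [pvWords]]
        rw [show pvLoopA (cur.reverse :: pvWords rest []) s
              = pvLoopA (pvWords rest []) (s + ((cur.reverse.length : Int) + 1)) from by
          simp [pvLoopA, pvCond_eq, List.any_reverse, hb]]
        rw [ih]
        simp [pvE]
        ring
    · rw [show pvWords (c :: rest) cur = pvWords rest (c :: cur) from by simp [pvWords, hc]]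
      rw [ih]
      simp only [pvE, List.any_cons, List.length_cons, hc, if_false, Bool.or_comm]
      push_cast
      ring

theorem pvFind_go_single : ∀ (c0 : Char) (l : List Char) (k : Nat),
    PySem.Chars.find.go [c0] l k =
      (match l.findIdx? (· == c0) with
       | none => -1
       | some i => ((k + i : Nat) : Int)) := by
  intro c0 l
  induction l with
  | nil => intro k; rw [PySem.Chars.find.go.eq_def]; simp
  | cons c t ih =>
    intro k
    rw [PySem.Chars.find.go.eq_def]
    by_cases hc : c = c0
    · subst hc
      have hp : ([c] : List Char).isPrefixOf (c :: t) = true := by simp [List.isPrefixOf]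
      simp [hp, List.findIdx?_cons]
    · have hp : ([c0] : List Char).isPrefixOf (c :: t) = false := by
        simp [List.isPrefixOf]; exact fun heq => hc heq.symm
      have hb : (c == c0) = false := by simp [hc]
      simp only [hp, Bool.false_eq_true, if_false]
      rw [ih (k + 1)]
      cases hfi : List.findIdx? (· == c0) t <;> simp [List.findIdx?_cons, hb, hfi] <;> ring

theorem pvFind_single (c0 : Char) (l : List Char) :
    PySem.Chars.find l [c0] =
      (match l.findIdx? (· == c0) with
       | none => -1
       | some i => (i : Int)) := by
  unfold PySem.Chars.find
  rw [pvFind_go_single]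
  cases List.findIdx? (· == c0) l <;> simp

theorem pvE_true (l : List Char) :
    pvE l true =
      (match l.findIdx? (· == ' ') with
       | none => (l.length : Int) + 1
       | some sp => (sp : Int) + 1) := by
  induction l with
  | nil => simp [pvE]
  | cons c r ih =>
    by_cases hc : c = ' '
    · subst hc; simp [pvE, List.findIdx?_cons]
    · have hb : (c == ' ') = false := by simp [hc]
      rw [show pvE (c :: r) true = 1 + pvE r true from by simp [pvE, hc]]
      rw [ih]
      cases hfi : List.findIdx? (· == ' ') r <;>
        simp [List.findIdx?_cons, hb, hfi] <;> ring

theorem pvIsEnd_ne_space {c : Char} (h : pvIsEnd c = true) : c ≠ ' ' := by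
  intro heq; subst heq; exact absurd h (by decide)

theorem pvE_false : ∀ (l : List Char),
    pvE l false =
      (match l.findIdx? pvIsEnd with
       | none => (l.length : Int) + 1
       | some pos =>
           let sp := PySem.Chars.findFrom l [' '] (pos : Int) none
           if sp = -1 then (l.length : Int) + 1 else sp + 1) := by
  intro l
  induction l with
  | nil => simp [pvE]
  | cons c r ih =>
    cases hpc : pvIsEnd c with
    | true =>
      have hc : c ≠ ' ' := pvIsEnd_ne_space hpc
      have hb : (c == ' ') = false := by simp [hc]
      rw [show pvE (c :: r) false = 1 + pvE r true from by simp [pvE, hc, hpc]]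
      rw [pvE_true]
      rw [show List.findIdx? pvIsEnd (c :: r) = some 0 from by simp [List.findIdx?_cons, hpc]]
      simp only [Nat.cast_zero]
      rw [PySem.Chars.findFrom_zero]
      rw [pvFind_single]
      rw [show List.findIdx? (· == ' ') (c :: r) = Option.map (· + 1) (List.findIdx? (· == ' ') r) from by
        simp [List.findIdx?_cons, hb]]
      cases hsp : List.findIdx? (· == ' ') r with
      | none => simp; ring
      | some j =>
        simp only [Option.map_some, List.length_cons]
        have e1 : ((j + 1 : Nat) : Int) = (j : Int) + 1 := by omega
        have e2 : ((r.length + 1 : Nat) : Int) = (r.length : Int) + 1 := by omega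
        rw [e1, e2]
        split_ifs <;> first | omega | ring
    | false =>
      rw [show pvE (c :: r) false = 1 + pvE r false from by
        by_cases hc : c = ' ' <;> simp [pvE, hc, hpc]]
      rw [ih]
      rw [show List.findIdx? pvIsEnd (c :: r) = Option.map (· + 1) (List.findIdx? pvIsEnd r) from by
        simp [List.findIdx?_cons, hpc]]
      cases hfi : List.findIdx? pvIsEnd r with
      | none => simp; ring
      | some p =>
        have hplt : p < r.length := (List.findIdx?_eq_some_iff_findIdx_eq.mp hfi).1
        simp only [Option.map_some]
        rw [PySem.Chars.findFrom_natCast r [' '] p (by omega)]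
        rw [PySem.Chars.findFrom_natCast (c :: r) [' '] (p + 1) (by simp; omega)]
        simp only [List.drop_succ_cons, List.length_cons]
        have hlb : (-1 : Int) ≤ PySem.Chars.find (List.drop p r) [' '] :=
          PySem.Chars.neg_one_le_find (List.drop p r) [' ']
        generalize hgen : PySem.Chars.find (List.drop p r) [' '] = f
        rw [hgen] at hlb
        have e1 : ((p + 1 : Nat) : Int) = (p : Int) + 1 := by omega
        have e2 : ((r.length + 1 : Nat) : Int) = (r.length : Int) + 1 := by omega
        rw [e1, e2]
        split_ifs <;> first | omega | ring

-- ===== VERDICT (by name: the statement is the Claim_ definition above) =====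
theorem get_len_of_next_sentence_spec : Claim_equal_get_len_of_next_sentence := by
  intro query idx _
  unfold Spec_get_len_of_next_sentence get_len_of_next_sentence get_len_of_next_sentence_alt
  rw [pvSplitOn_eq, pvLoopA_words]
  simp only [List.any_nil, List.length_nil, Nat.cast_zero, add_zero, zero_add]
  rw [pvE_false]
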